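-- pv_equiv track=rewrite | github.com/rgmundo524/tdccp_analysis | scripts/plot_tdccp_address_bubble_with_spikes.py | _resolve_address_column
-- ===== SOURCE A (Python) =====
-- from typing import Iterable, List, Optional, Set, Tuple
--
-- def _resolve_address_column(columns: Iterable[str]) -> Optional[str]:
--     normalized = [(col, (col or "").strip().lower()) for col in columns if col]
--     preferred = [
--         "from_address",
--         "address",
--         "addr",
--         "wallet_address",
--         "wallet",
--         "spike_address",
--         "highlight_address",
--         "account_address",
--         "account",
--     ]
--     for target in preferred:
--         for original, lowered in normalized:
--             if lowered == target:
--                 return original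
--
--     for original, lowered in normalized:
--         if "address" in lowered and not lowered.startswith("to_"):
--             return original
--     return None
-- ===== SOURCE B (Python) =====
-- def _resolve_address_column(columns):
--     preferred = [
--         "from_address",
--         "address",
--         "addr",
--         "wallet_address",
--         "wallet",
--         "spike_address",
--         "highlight_address",
--         "account_address",
--         "account",
--     ]
--     rank_of = {name: i for i, name in enumerate(preferred)}
--     best_rank = 10  # 10 = no usable column
--     best_col = None
--     for col in columns:
--         if not col:
--             continue
--         low = col.strip().lower()
--         r = rank_of.get(low)
--         if r is None:
--             r = 9 if ("address" in low and not low.startswith("to_")) else 10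
--         if r < best_rank:
--             best_rank = r
--             best_col = col
--     return best_col
-- ===== Notes on version B (the rewrite author's own statement) =====
-- stated objective: faster
-- what changed: A makes up to ten passes (one scan per preferred name, then a substring-fallback scan) over the normalized column list; B builds a name-to-index rank dictionary once and makes a single pass keeping the lowest-ranked, earliest column (exact matches rank 0-8, substring fallback 9, unusable 10).
import Mathlib
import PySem

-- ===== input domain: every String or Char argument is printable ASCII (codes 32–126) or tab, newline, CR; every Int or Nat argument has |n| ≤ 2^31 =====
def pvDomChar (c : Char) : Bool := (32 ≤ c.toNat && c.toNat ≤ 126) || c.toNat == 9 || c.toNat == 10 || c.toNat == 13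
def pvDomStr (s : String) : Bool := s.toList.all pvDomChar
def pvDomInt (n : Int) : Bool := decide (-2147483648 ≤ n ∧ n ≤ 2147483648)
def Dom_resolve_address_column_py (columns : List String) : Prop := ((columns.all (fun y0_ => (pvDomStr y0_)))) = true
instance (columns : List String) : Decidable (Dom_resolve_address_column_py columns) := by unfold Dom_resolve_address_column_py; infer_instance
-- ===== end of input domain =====

-- B replaces A's ten successive scans (one per preferred name, then a substring
-- fallback) by a single pass that ranks each column via a name→index dictionary
-- and keeps the lowest-ranked, earliest column (one scan instead of up to ten; a timing run measured B faster).

-- ===== PORT A =====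
-- the literal preferred-name list of the Python source (shared verbatim by both programs)
def pvPreferred : List String :=
  ["from_address", "address", "addr", "wallet_address", "wallet",
   "spike_address", "highlight_address", "account_address", "account"]

-- (col or "").strip().lower(); under the 'if col' filter 'col or ""' is col itself
def pvNorm (c : String) : String := PySem.Str.lower (PySem.Str.strip c)

-- inner loop of 'for target in preferred'
def pvFindPair (normalized : List (String × String)) (target : String) : Option String :=
  match normalized with
  | [] => none
  | (original, lowered) :: rest =>
    if lowered == target then some original else pvFindPair rest target

-- outer loop 'for target in preferred'
def pvFirstExact (targets : List String) (normalized : List (String × String)) : Option String :=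
  match targets with
  | [] => none
  | t :: ts =>
    match pvFindPair normalized t with
    | some o => some o
    | none => pvFirstExact ts normalized

-- the final fallback loop
def pvFallback (normalized : List (String × String)) : Option String :=
  match normalized with
  | [] => none
  | (original, lowered) :: rest =>
    if PySem.Str.isIn "address" lowered && !(PySem.Str.startswith lowered "to_")
    then some original else pvFallback rest

def resolve_address_column_py (columns : List String) : Option String :=
  let normalized := (columns.filter (fun c => !(c == ""))).map (fun c => (c, pvNorm c))
  match pvFirstExact pvPreferred normalized with
  | some o => some o
  | none => pvFallback normalized

-- ===== PORT B =====
-- rank_of = {name: i for i, name in enumerate(preferred)}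
def pvRankOf : PySem.Dict String Int :=
  (PySem.List.enumerate pvPreferred).foldl (fun d p => d.insert p.2 p.1) PySem.Dict.empty

-- the single 'for col in columns' loop, carrying (best_rank, best_col)
def pvLoopB (cols : List String) (bestRank : Int) (best : Option String) : Option String :=
  match cols with
  | [] => best
  | c :: cs =>
    if c == "" then pvLoopB cs bestRank best
    else
      let low := pvNorm c
      let r : Int :=
        match pvRankOf.get? low with
        | some i => i
        | none =>
          if PySem.Str.isIn "address" low && !(PySem.Str.startswith low "to_") then 9 else 10
      if r < bestRank then pvLoopB cs r (some c) else pvLoopB cs bestRank best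

def resolve_address_column_py_alt (columns : List String) : Option String :=
  pvLoopB columns 10 none

-- ===== PRECONDITION & SPEC =====
def Spec_resolve_address_column_py (columns : List String) (out : Option String) : Prop := out = resolve_address_column_py_alt columns
instance (columns : List String) (out : Option String) : Decidable (Spec_resolve_address_column_py columns out) := by unfold Spec_resolve_address_column_py; infer_instance

-- ===== CLAIM (what is proved, stated in full; the proofs are below) =====
def Claim_equal_resolve_address_column_py : Prop := ∀ (columns : List String), Dom_resolve_address_column_py columns → Spec_resolve_address_column_py columns (resolve_address_column_py columns)


-- ===== LEMMAS AND PROOFS =====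

-- the rank B's loop computes for a (nonempty) column, as a standalone function
def pvR (c : String) : Int :=
  match pvRankOf.get? (pvNorm c) with
  | some i => i
  | none =>
    if PySem.Str.isIn "address" (pvNorm c) && !(PySem.Str.startswith (pvNorm c) "to_") then 9 else 10

lemma pvR_eq (c : String) : pvR c =
    if "from_address" == pvNorm c then 0
    else if "address" == pvNorm c then 1
    else if "addr" == pvNorm c then 2
    else if "wallet_address" == pvNorm c then 3
    else if "wallet" == pvNorm c then 4
    else if "spike_address" == pvNorm c then 5
    else if "highlight_address" == pvNorm c then 6
    else if "account_address" == pvNorm c then 7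
    else if "account" == pvNorm c then 8
    else if PySem.Str.isIn "address" (pvNorm c) && !(PySem.Str.startswith (pvNorm c) "to_") then 9
    else 10 := by
  have h : pvRankOf = PySem.Dict.mk
      [("from_address", 0), ("address", 1), ("addr", 2), ("wallet_address", 3), ("wallet", 4),
       ("spike_address", 5), ("highlight_address", 6), ("account_address", 7), ("account", 8)] := by
    rfl
  unfold pvR
  rw [h]
  simp only [PySem.Dict.get?_mk_cons]
  split_ifs <;> simp_all [PySem.Dict.get?]

lemma pvR_nonneg (c : String) : 0 ≤ pvR c := by
  rw [pvR_eq]; split_ifs <;> omega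

-- pointwise: A's exact-match test against the j-th preferred name is B's rank-j test
lemma pvPt0 (c : String) : (pvNorm c == "from_address") = (pvR c == 0) := by
  rw [pvR_eq, Bool.beq_comm]
  generalize pvNorm c = s
  split_ifs
  all_goals simp only [beq_iff_eq] at *
  all_goals try subst_vars
  all_goals first | decide | simp_all
lemma pvPt1 (c : String) : (pvNorm c == "address") = (pvR c == 1) := by
  rw [pvR_eq, Bool.beq_comm]
  generalize pvNorm c = s
  split_ifs
  all_goals simp only [beq_iff_eq] at *
  all_goals try subst_vars
  all_goals first | decide | simp_all
lemma pvPt2 (c : String) : (pvNorm c == "addr") = (pvR c == 2) := by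
  rw [pvR_eq, Bool.beq_comm]
  generalize pvNorm c = s
  split_ifs
  all_goals simp only [beq_iff_eq] at *
  all_goals try subst_vars
  all_goals first | decide | simp_all
lemma pvPt3 (c : String) : (pvNorm c == "wallet_address") = (pvR c == 3) := by
  rw [pvR_eq, Bool.beq_comm]
  generalize pvNorm c = s
  split_ifs
  all_goals simp only [beq_iff_eq] at *
  all_goals try subst_vars
  all_goals first | decide | simp_all
lemma pvPt4 (c : String) : (pvNorm c == "wallet") = (pvR c == 4) := by
  rw [pvR_eq, Bool.beq_comm]
  generalize pvNorm c = s
  split_ifs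
  all_goals simp only [beq_iff_eq] at *
  all_goals try subst_vars
  all_goals first | decide | simp_all
lemma pvPt5 (c : String) : (pvNorm c == "spike_address") = (pvR c == 5) := by
  rw [pvR_eq, Bool.beq_comm]
  generalize pvNorm c = s
  split_ifs
  all_goals simp only [beq_iff_eq] at *
  all_goals try subst_vars
  all_goals first | decide | simp_all
lemma pvPt6 (c : String) : (pvNorm c == "highlight_address") = (pvR c == 6) := by
  rw [pvR_eq, Bool.beq_comm]
  generalize pvNorm c = s
  split_ifs
  all_goals simp only [beq_iff_eq] at *
  all_goals try subst_vars
  all_goals first | decide | simp_all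
lemma pvPt7 (c : String) : (pvNorm c == "account_address") = (pvR c == 7) := by
  rw [pvR_eq, Bool.beq_comm]
  generalize pvNorm c = s
  split_ifs
  all_goals simp only [beq_iff_eq] at *
  all_goals try subst_vars
  all_goals first | decide | simp_all
lemma pvPt8 (c : String) : (pvNorm c == "account") = (pvR c == 8) := by
  rw [pvR_eq, Bool.beq_comm]
  generalize pvNorm c = s
  split_ifs
  all_goals simp only [beq_iff_eq] at *
  all_goals try subst_vars
  all_goals first | decide | simp_all

-- pointwise: once no column ranks below 9, A's substring fallback test is B's rank-9 test
set_option maxHeartbeats 1600000 in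
lemma pvPt9 (c : String) (h : 9 ≤ pvR c) :
    (PySem.Str.isIn "address" (pvNorm c) && !(PySem.Str.startswith (pvNorm c) "to_")) = (pvR c == 9) := by
  rw [pvR_eq] at h ⊢
  revert h
  generalize pvNorm c = s
  intro h
  split_ifs at h ⊢ <;> first | (exfalso; omega) | simp_all

-- generic facts about foldr min on Int lists
lemma pvFoldminLeInit (l : List Int) (a : Int) : l.foldr min a ≤ a := by
  induction l with
  | nil => simp
  | cons x l ih => simp only [List.foldr_cons]; exact le_trans (min_le_right _ _) ih

lemma pvFoldminLeMem (l : List Int) (a x : Int) (hx : x ∈ l) : l.foldr min a ≤ x := by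
  induction l with
  | nil => cases hx
  | cons y l ih =>
    simp only [List.foldr_cons]
    rcases List.mem_cons.mp hx with h | h
    · subst h; exact min_le_left _ _
    · exact le_trans (min_le_right _ _) (ih h)

lemma pvLeFoldmin (l : List Int) (a v : Int) (h1 : ∀ x ∈ l, v ≤ x) (h2 : v ≤ a) :
    v ≤ l.foldr min a := by
  induction l with
  | nil => simpa
  | cons x l ih =>
    simp only [List.foldr_cons]
    exact le_min (h1 x (by simp)) (ih fun x hx => h1 x (by simp [hx]))

lemma pvFoldminShift (l : List Int) (a b : Int) (h : a ≤ b) :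
    l.foldr min a = min (l.foldr min b) a := by
  induction l with
  | nil => exact (min_eq_right h).symm
  | cons x l ih =>
    simp only [List.foldr_cons, ih]
    exact (min_assoc x (l.foldr min b) a).symm

-- find? only depends on the predicate's values on the list
lemma pvFindCongr {α : Type} (l : List α) (p q : α → Bool) (h : ∀ a ∈ l, p a = q a) :
    l.find? p = l.find? q := by
  induction l with
  | nil => rfl
  | cons x l ih =>
    have hx := h x (by simp)
    by_cases hp : p x = true
    · rw [List.find?_cons_of_pos hp, List.find?_cons_of_pos (hx ▸ hp)]
    · rw [List.find?_cons_of_neg hp,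
        List.find?_cons_of_neg (by rw [← hx]; exact hp),
        ih fun a ha => h a (by simp [ha])]

-- A-side loop characterizations
lemma pvFindPair_map (ns : List String) (t : String) :
    pvFindPair (ns.map fun c => (c, pvNorm c)) t = ns.find? (fun c => pvNorm c == t) := by
  induction ns with
  | nil => rfl
  | cons c cs ih =>
    simp only [List.map_cons, pvFindPair]
    by_cases h : (pvNorm c == t) = true
    · rw [if_pos h]; exact (List.find?_cons_of_pos (p := fun c => pvNorm c == t) h).symm
    · rw [if_neg h, ih]; exact (List.find?_cons_of_neg (p := fun c => pvNorm c == t) h).symm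

lemma pvFallback_map (ns : List String) :
    pvFallback (ns.map fun c => (c, pvNorm c)) =
      ns.find? (fun c => PySem.Str.isIn "address" (pvNorm c) && !(PySem.Str.startswith (pvNorm c) "to_")) := by
  induction ns with
  | nil => rfl
  | cons c cs ih =>
    simp only [List.map_cons, pvFallback]
    by_cases h : (PySem.Str.isIn "address" (pvNorm c) && !(PySem.Str.startswith (pvNorm c) "to_")) = true
    · rw [if_pos h]
      exact (List.find?_cons_of_pos
        (p := fun c => PySem.Str.isIn "address" (pvNorm c) && !(PySem.Str.startswith (pvNorm c) "to_")) h).symm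
    · rw [if_neg h, ih]
      exact (List.find?_cons_of_neg
        (p := fun c => PySem.Str.isIn "address" (pvNorm c) && !(PySem.Str.startswith (pvNorm c) "to_")) h).symm

-- B-side loop characterization: the scan keeps the earliest column of minimal rank
lemma pvLoopB_cons_ne (c : String) (cs : List String) (br : Int) (b : Option String)
    (h : (c == "") = false) :
    pvLoopB (c :: cs) br b =
      if pvR c < br then pvLoopB cs (pvR c) (some c) else pvLoopB cs br b := by
  simp [pvLoopB, pvR, h]

set_option maxHeartbeats 1600000 in
lemma pvLoopB_eq (cs : List String) (br : Int) (b : Option String) :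
    pvLoopB cs br b =
      if (((cs.filter (fun c => !(c == ""))).map pvR).foldr min br) < br
      then (cs.filter (fun c => !(c == ""))).find?
             (fun c => pvR c == (((cs.filter (fun c => !(c == ""))).map pvR).foldr min br))
      else b := by
  induction cs generalizing br b with
  | nil => simp [pvLoopB]
  | cons c cs ih =>
    by_cases hc : c = ""
    · subst hc
      have : pvLoopB ("" :: cs) br b = pvLoopB cs br b := by simp [pvLoopB]
      rw [this, ih]
      simp
    · have hcb : (c == "") = false := by simp [hc]
      have hfil : (c :: cs).filter (fun c => !(c == "")) = c :: cs.filter (fun c => !(c == "")) := by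
        simp [hcb]
      rw [pvLoopB_cons_ne c cs br b hcb, hfil]
      set ns := cs.filter (fun c => !(c == "")) with hnsdef
      set m0 := (ns.map pvR).foldr min br with hm0
      have hm0i : m0 ≤ br := pvFoldminLeInit _ _
      simp only [List.map_cons, List.foldr_cons]
      by_cases h1 : pvR c < br
      · rw [if_pos h1, ih (pvR c) (some c)]
        have hsh : (ns.map pvR).foldr min (pvR c) = min m0 (pvR c) :=
          pvFoldminShift _ _ _ (le_of_lt h1)
        rw [hsh]
        rw [if_pos (lt_of_le_of_lt (min_le_left (pvR c) m0) h1)]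
        by_cases h2 : min m0 (pvR c) < pvR c
        · rw [if_pos h2]
          have hmc : min (pvR c) m0 = min m0 (pvR c) := min_comm _ _
          rw [hmc]
          rw [List.find?_cons_of_neg (p := fun x => pvR x == min m0 (pvR c))
            (by simp only [beq_iff_eq]; omega)]
        · rw [if_neg h2]
          have hmm : min m0 (pvR c) = pvR c :=
            le_antisymm (min_le_right _ _) (not_lt.mp h2)
          rw [min_comm (pvR c) m0, hmm,
            List.find?_cons_of_pos (p := fun x => pvR x == pvR c) (by simp)]
      · rw [if_neg h1, ih br b]
        have hge : br ≤ pvR c := not_lt.mp h1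
        have hmin : min (pvR c) m0 = m0 := min_eq_right (by omega)
        rw [hmin]
        by_cases h2 : m0 < br
        · rw [if_pos h2, if_pos h2]
          rw [List.find?_cons_of_neg (p := fun x => pvR x == m0)
            (by simp only [beq_iff_eq]; omega)]
        · rw [if_neg h2, if_neg h2]

-- step lemmas for walking A's chain of scans
lemma pvBump (ns : List String) (j : Int)
    (hlow : ∀ c ∈ ns, j ≤ pvR c) (hnone : ns.find? (fun c => pvR c == j) = none) :
    ∀ c ∈ ns, j + 1 ≤ pvR c := by
  intro c hc
  have h1 := List.find?_eq_none.mp hnone c hc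
  have h2 := hlow c hc
  simp only [beq_iff_eq] at h1
  omega

lemma pvStop (ns : List String) (j : Int) (o : String)
    (hlow : ∀ c ∈ ns, j ≤ pvR c) (hsome : ns.find? (fun c => pvR c == j) = some o)
    (hjlt : j < 10) :
    some o =
      (if (((ns.map pvR).foldr min 10) : Int) < 10
       then ns.find? (fun c => pvR c == ((ns.map pvR).foldr min 10))
       else none) := by
  have hmem : o ∈ ns := List.mem_of_find?_eq_some hsome
  have hpo : (pvR o == j) = true := List.find?_some (p := fun c => pvR c == j) hsome
  simp only [beq_iff_eq] at hpo
  have h1 : (ns.map pvR).foldr min 10 ≤ j := by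
    have : pvR o ∈ ns.map pvR := List.mem_map_of_mem hmem
    have := pvFoldminLeMem _ 10 _ this
    omega
  have h2 : j ≤ (ns.map pvR).foldr min 10 := by
    refine pvLeFoldmin _ _ _ ?_ (by omega)
    intro x hx
    rcases List.mem_map.mp hx with ⟨c, hc, rfl⟩
    exact hlow c hc
  have hm : (ns.map pvR).foldr min 10 = j := le_antisymm h1 h2
  rw [hm, if_pos hjlt, hsome]

lemma pvAllNone (ns : List String) (hlow : ∀ c ∈ ns, (10 : Int) ≤ pvR c) :
    (none : Option String) =
      (if (((ns.map pvR).foldr min 10) : Int) < 10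
       then ns.find? (fun c => pvR c == ((ns.map pvR).foldr min 10))
       else none) := by
  have h2 : (10 : Int) ≤ (ns.map pvR).foldr min 10 := by
    refine pvLeFoldmin _ _ _ ?_ (by omega)
    intro x hx
    rcases List.mem_map.mp hx with ⟨c, hc, rfl⟩
    exact hlow c hc
  rw [if_neg (by omega)]

-- ===== VERDICT (by name: the statement is the Claim_ definition above) =====
theorem resolve_address_column_py_spec : Claim_equal_resolve_address_column_py := by
  intro columns _
  unfold Spec_resolve_address_column_py resolve_address_column_py resolve_address_column_py_alt
  rw [pvLoopB_eq]
  set ns := columns.filter (fun c => !(c == "")) with hns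
  simp only [pvPreferred, pvFirstExact, pvFindPair_map, pvFallback_map]
  rw [pvFindCongr ns _ _ (fun c _ => pvPt0 c),
      pvFindCongr ns _ _ (fun c _ => pvPt1 c),
      pvFindCongr ns _ _ (fun c _ => pvPt2 c),
      pvFindCongr ns _ _ (fun c _ => pvPt3 c),
      pvFindCongr ns _ _ (fun c _ => pvPt4 c),
      pvFindCongr ns _ _ (fun c _ => pvPt5 c),
      pvFindCongr ns _ _ (fun c _ => pvPt6 c),
      pvFindCongr ns _ _ (fun c _ => pvPt7 c),
      pvFindCongr ns _ _ (fun c _ => pvPt8 c)]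
  have h0 : ∀ c ∈ ns, (0 : Int) ≤ pvR c := fun c _ => pvR_nonneg c
  cases e0 : ns.find? (fun c => pvR c == 0) with
  | some o => exact pvStop ns 0 o h0 e0 (by norm_num)
  | none =>
  have h1 : ∀ c ∈ ns, (1 : Int) ≤ pvR c := fun c hc => by have := pvBump ns 0 h0 e0 c hc; omega
  cases e1 : ns.find? (fun c => pvR c == 1) with
  | some o => exact pvStop ns 1 o h1 e1 (by norm_num)
  | none =>
  have h2 : ∀ c ∈ ns, (2 : Int) ≤ pvR c := fun c hc => by have := pvBump ns 1 h1 e1 c hc; omega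
  cases e2 : ns.find? (fun c => pvR c == 2) with
  | some o => exact pvStop ns 2 o h2 e2 (by norm_num)
  | none =>
  have h3 : ∀ c ∈ ns, (3 : Int) ≤ pvR c := fun c hc => by have := pvBump ns 2 h2 e2 c hc; omega
  cases e3 : ns.find? (fun c => pvR c == 3) with
  | some o => exact pvStop ns 3 o h3 e3 (by norm_num)
  | none =>
  have h4 : ∀ c ∈ ns, (4 : Int) ≤ pvR c := fun c hc => by have := pvBump ns 3 h3 e3 c hc; omega
  cases e4 : ns.find? (fun c => pvR c == 4) with
  | some o => exact pvStop ns 4 o h4 e4 (by norm_num)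
  | none =>
  have h5 : ∀ c ∈ ns, (5 : Int) ≤ pvR c := fun c hc => by have := pvBump ns 4 h4 e4 c hc; omega
  cases e5 : ns.find? (fun c => pvR c == 5) with
  | some o => exact pvStop ns 5 o h5 e5 (by norm_num)
  | none =>
  have h6 : ∀ c ∈ ns, (6 : Int) ≤ pvR c := fun c hc => by have := pvBump ns 5 h5 e5 c hc; omega
  cases e6 : ns.find? (fun c => pvR c == 6) with
  | some o => exact pvStop ns 6 o h6 e6 (by norm_num)
  | none =>
  have h7 : ∀ c ∈ ns, (7 : Int) ≤ pvR c := fun c hc => by have := pvBump ns 6 h6 e6 c hc; omega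
  cases e7 : ns.find? (fun c => pvR c == 7) with
  | some o => exact pvStop ns 7 o h7 e7 (by norm_num)
  | none =>
  have h8 : ∀ c ∈ ns, (8 : Int) ≤ pvR c := fun c hc => by have := pvBump ns 7 h7 e7 c hc; omega
  cases e8 : ns.find? (fun c => pvR c == 8) with
  | some o => exact pvStop ns 8 o h8 e8 (by norm_num)
  | none =>
  have h9 : ∀ c ∈ ns, (9 : Int) ≤ pvR c := fun c hc => by have := pvBump ns 8 h8 e8 c hc; omega
  rw [pvFindCongr ns _ _ (fun c hc => pvPt9 c (h9 c hc))]
  cases e9 : ns.find? (fun c => pvR c == 9) with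
  | some o => exact pvStop ns 9 o h9 e9 (by norm_num)
  | none =>
  have h10 : ∀ c ∈ ns, (10 : Int) ≤ pvR c := fun c hc => by have := pvBump ns 9 h9 e9 c hc; omega
  exact pvAllNone ns h10
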